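-- pv_equiv track=rewrite | github.com/software-web-ect/Latihan-Python | 00 template/main.py | bintang
-- ===== SOURCE A (Python) =====
-- def bintang(baris):
--     kolom = baris *2 -1
--     spasi = 0
--     hasil = ""
--     for i in range(baris):
--         for j in range(spasi):
--             hasil += " "
--         for j in range(kolom):
--             if i == 0:
--                 simbol = "*"
--             elif i == baris -1:
--                 simbol =  "."
--             elif j == 0 or j == kolom -1 :
--                 simbol = "*"
--             else :
--                 simbol = "."
--             hasil += simbol
--         kolom -= 2
--         spasi += 1
--         if baris ==1 :
--             hasil += ""
--         else:
--             hasil += "\n"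
--     baris = baris -1
--     kolom = 3
--     spasi = baris -1
--     for i in range(baris):
--         for j in range(spasi):
--             hasil += " "
--         for j in range(kolom):
--             if j == 0 or j == kolom -1:
--                 simbol = "*"
--             elif i == baris -1:
--                 simbol = "*"
--             else :
--                 simbol = "."
--             hasil += simbol
--         kolom += 2
--         spasi -= 1
--         if i != baris -1:
--             hasil += "\n"
--         else :
--             hasil+=""
--     return hasil
-- ===== SOURCE B (Python) =====
-- def bintang(baris):
--     lines = []
--     for i in range(baris):
--         w = 2 * baris - 1 - 2 * i
--         if i == 0:
--             content = "*" * w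
--         elif i == baris - 1:
--             content = "." * w
--         else:
--             content = "*" + "." * (w - 2) + "*"
--         lines.append(" " * i + content)
--     for i in range(baris - 1):
--         w = 3 + 2 * i
--         if i == baris - 2:
--             content = "*" * w
--         else:
--             content = "*" + "." * (w - 2) + "*"
--         lines.append(" " * (baris - 2 - i) + content)
--     return "\n".join(lines)
-- ===== Notes on version B (the rewrite author's own statement) =====
-- stated objective: simpler
-- what changed: B builds each row as a closed-form string (spaces + stars/dots from width arithmetic) collected in a list and joined with ' ', instead of A's per-character nested loops with mutable kolom/spasi counters and manual newline bookkeeping.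
import Mathlib
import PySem

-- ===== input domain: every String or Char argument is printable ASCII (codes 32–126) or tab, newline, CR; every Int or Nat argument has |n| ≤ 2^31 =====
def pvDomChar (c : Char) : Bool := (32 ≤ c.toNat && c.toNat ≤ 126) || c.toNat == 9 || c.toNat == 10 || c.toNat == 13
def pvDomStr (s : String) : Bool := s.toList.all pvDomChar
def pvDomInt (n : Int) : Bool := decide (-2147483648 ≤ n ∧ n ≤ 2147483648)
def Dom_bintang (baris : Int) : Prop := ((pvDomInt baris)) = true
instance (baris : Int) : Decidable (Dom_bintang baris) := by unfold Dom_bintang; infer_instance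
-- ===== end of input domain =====

-- B builds each row as a closed-form string and joins the rows with '\n', replacing A's
-- per-character nested loops and manual newline bookkeeping (objective: simpler).

-- ===== PORT A =====
-- literal transliteration: outer loops fold over range with state (kolom, spasi, hasil);
-- hasil is kept as List Char (the Python string is built by one-char '+=').
def bintangStep1 (baris : Int) (st : Int × Int × List Char) (i : Int) : Int × Int × List Char :=
  let kolom := st.1
  let spasi := st.2.1
  let hasil := st.2.2
  let hasil := (PySem.List.pyRange 0 spasi 1).foldl (fun h _ => h ++ [' ']) hasil
  let hasil := (PySem.List.pyRange 0 kolom 1).foldl (fun h j =>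
      let simbol : Char :=
        if i = 0 then '*'
        else if i = baris - 1 then '.'
        else if j = 0 ∨ j = kolom - 1 then '*'
        else '.'
      h ++ [simbol]) hasil
  let hasil := if baris = 1 then hasil ++ [] else hasil ++ ['\n']
  (kolom - 2, spasi + 1, hasil)

def bintangStep2 (barisM : Int) (st : Int × Int × List Char) (i : Int) : Int × Int × List Char :=
  let kolom := st.1
  let spasi := st.2.1
  let hasil := st.2.2
  let hasil := (PySem.List.pyRange 0 spasi 1).foldl (fun h _ => h ++ [' ']) hasil
  let hasil := (PySem.List.pyRange 0 kolom 1).foldl (fun h j =>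
      let simbol : Char :=
        if j = 0 ∨ j = kolom - 1 then '*'
        else if i = barisM - 1 then '*'
        else '.'
      h ++ [simbol]) hasil
  let hasil := if i ≠ barisM - 1 then hasil ++ ['\n'] else hasil ++ []
  (kolom + 2, spasi - 1, hasil)

def bintang (baris : Int) : String :=
  let st1 := (PySem.List.pyRange 0 baris 1).foldl (bintangStep1 baris)
      (baris * 2 - 1, 0, ([] : List Char))
  let barisM := baris - 1
  let st2 := (PySem.List.pyRange 0 barisM 1).foldl (bintangStep2 barisM)
      (3, barisM - 1, st1.2.2)
  String.ofList st2.2.2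

-- ===== PORT B =====
def bintangAltLine1 (baris i : Int) : List Char :=
  let w := 2 * baris - 1 - 2 * i
  let content :=
    if i = 0 then List.replicate w.toNat '*'
    else if i = baris - 1 then List.replicate w.toNat '.'
    else '*' :: (List.replicate (w - 2).toNat '.' ++ ['*'])
  List.replicate i.toNat ' ' ++ content

def bintangAltLine2 (baris i : Int) : List Char :=
  let w := 3 + 2 * i
  let content :=
    if i = baris - 2 then List.replicate w.toNat '*'
    else '*' :: (List.replicate (w - 2).toNat '.' ++ ['*'])
  List.replicate (baris - 2 - i).toNat ' ' ++ content

def bintang_alt (baris : Int) : String :=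
  let lines := (PySem.List.pyRange 0 baris 1).map (bintangAltLine1 baris)
      ++ (PySem.List.pyRange 0 (baris - 1) 1).map (bintangAltLine2 baris)
  String.ofList (PySem.Chars.join ['\n'] lines)

-- ===== PRECONDITION & SPEC =====
def Spec_bintang (baris : Int) (out : String) : Prop := out = bintang_alt baris
instance (baris : Int) (out : String) : Decidable (Spec_bintang baris out) := by unfold Spec_bintang; infer_instance

-- ===== CLAIM (what is proved, stated in full; the proofs are below) =====
def Claim_equal_bintang : Prop := ∀ (baris : Int), Dom_bintang baris → Spec_bintang baris (bintang baris)

-- ===== LEMMAS AND PROOFS =====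

-- the newline A appends after every upper row (none when baris = 1)
def pvNlU (baris : Int) : List Char := if baris = 1 then [] else ['\n']

theorem pv_map_const_pyRange (a b : Int) (c : Char) :
    (PySem.List.pyRange a b 1).map (fun _ => c) = List.replicate (b - a).toNat c := by
  rw [List.map_const', PySem.List.length_pyRange_one]

theorem pv_spaces_fold (n : Int) (h : List Char) :
    (PySem.List.pyRange 0 n 1).foldl (fun h _ => h ++ [' ']) h
      = h ++ List.replicate n.toNat ' ' := by
  rw [PySem.List.foldl_append_singleton_eq_map (f := fun _ => ' '),
    pv_map_const_pyRange]
  simp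

theorem pv_map_border (k : Int) (hk : 2 ≤ k) :
    (PySem.List.pyRange 0 k 1).map (fun j => if j = 0 ∨ j = k - 1 then '*' else '.')
      = '*' :: (List.replicate (k - 2).toNat '.' ++ ['*']) := by
  have hsing := PySem.List.pyRange_one_singleton (k - 1)
  rw [show k - 1 + 1 = k by ring] at hsing
  have h01 := PySem.List.pyRange_one_singleton 0
  rw [show (0 : Int) + 1 = 1 by ring] at h01
  have hsplit : PySem.List.pyRange 0 k 1
      = [0] ++ PySem.List.pyRange 1 (k - 1) 1 ++ [k - 1] := by
    rw [PySem.List.pyRange_one_append 0 1 k (by omega) (by omega),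
      PySem.List.pyRange_one_append 1 (k - 1) k (by omega) (by omega), hsing, h01]
    simp
  rw [hsplit]
  have hmid : (PySem.List.pyRange 1 (k - 1) 1).map
      (fun j => if j = 0 ∨ j = k - 1 then '*' else '.')
      = (PySem.List.pyRange 1 (k - 1) 1).map (fun _ => '.') := by
    apply List.map_congr_left
    intro j hj
    rw [PySem.List.mem_pyRange_one] at hj
    have h1 : ¬ j = 0 := by omega
    have h2 : ¬ j = k - 1 := by omega
    simp [h1, h2]
  simp only [List.map_append, List.map_cons, List.map_nil, hmid, pv_map_const_pyRange]
  have hne : ¬ (k - 1 = 0) := by omega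
  have ht : (k - 1 - 1).toNat = (k - 2).toNat := by omega
  simp [hne, ht]

theorem pv_rowU (baris i : Int) (h0 : 0 ≤ i) (h1 : i < baris) :
    (PySem.List.pyRange 0 (baris * 2 - 1 - 2 * i) 1).map (fun j =>
        if i = 0 then '*'
        else if i = baris - 1 then '.'
        else if j = 0 ∨ j = baris * 2 - 1 - 2 * i - 1 then '*'
        else '.')
      = (if i = 0 then List.replicate (2 * baris - 1 - 2 * i).toNat '*'
         else if i = baris - 1 then List.replicate (2 * baris - 1 - 2 * i).toNat '.'
         else '*' :: (List.replicate (2 * baris - 1 - 2 * i - 2).toNat '.' ++ ['*'])) := by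
  by_cases hi0 : i = 0
  · subst hi0
    simp only [if_pos rfl, if_true]
    rw [pv_map_const_pyRange]
    congr 1
    omega
  · by_cases hil : i = baris - 1
    · have hk : baris * 2 - 1 - 2 * i = 1 := by omega
      have h01 := PySem.List.pyRange_one_singleton 0
      rw [show (0 : Int) + 1 = 1 by ring] at h01
      rw [hk, h01]
      have hb0 : ¬ (baris - 1 = 0) := by omega
      simp only [List.map_cons, List.map_nil, hi0, hil]
      have hb : (2 * baris - 1 - 2 * (baris - 1)).toNat = 1 := by omega
      simp [hb0, hb]
    · have hk : 2 ≤ baris * 2 - 1 - 2 * i := by omega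
      simp only [hi0, hil, if_false]
      rw [pv_map_border _ hk]
      have e : baris * 2 - 1 - 2 * i - 2 = 2 * baris - 1 - 2 * i - 2 := by ring
      rw [e]

theorem pv_rowL (barisM i : Int) (h0 : 0 ≤ i) (h1 : i < barisM) :
    (PySem.List.pyRange 0 (3 + 2 * i) 1).map (fun j =>
        if j = 0 ∨ j = 3 + 2 * i - 1 then '*'
        else if i = barisM - 1 then '*'
        else '.')
      = (if i = barisM - 1 then List.replicate (3 + 2 * i).toNat '*'
         else '*' :: (List.replicate (3 + 2 * i - 2).toNat '.' ++ ['*'])) := by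
  by_cases hil : i = barisM - 1
  · subst hil
    simp only [if_true, ite_self]
    rw [pv_map_const_pyRange]
    congr 1
    omega
  · simp only [hil, if_false]
    rw [pv_map_border _ (by omega)]

theorem pv_loop1 (baris : Int) (n : Nat) (hn : (n : Int) ≤ baris) :
    (PySem.List.pyRange 0 (n : Int) 1).foldl (bintangStep1 baris)
        (baris * 2 - 1, 0, ([] : List Char))
      = (baris * 2 - 1 - 2 * n, (n : Int),
         ((PySem.List.pyRange 0 (n : Int) 1).map
             (fun i => bintangAltLine1 baris i ++ pvNlU baris)).flatten) := by
  induction n with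
  | zero => simp [PySem.List.pyRange_one_eq_nil (by omega : (0:Int) ≤ 0)]
  | succ n ih =>
    have hc : ((n + 1 : Nat) : Int) = (n : Int) + 1 := by push_cast; ring
    rw [hc, PySem.List.pyRange_one_succ_right (by omega), List.foldl_concat,
      ih (by omega)]
    rw [List.map_append, List.flatten_append]
    show bintangStep1 baris _ _ = _
    unfold bintangStep1
    dsimp only
    rw [pv_spaces_fold]
    rw [PySem.List.foldl_append_singleton_eq_map
      (f := fun j => if (n : Int) = 0 then '*'
        else if (n : Int) = baris - 1 then '.'
        else if j = 0 ∨ j = baris * 2 - 1 - 2 * (n : Int) - 1 then '*'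
        else '.')]
    rw [pv_rowU baris (n : Int) (by omega) (by omega)]
    unfold bintangAltLine1 pvNlU
    simp only [Prod.mk.injEq]
    refine ⟨by omega, by trivial, ?_⟩
    by_cases hb1 : baris = 1
    · simp [hb1, Int.toNat_natCast]
    · simp [hb1, Int.toNat_natCast]

theorem pv_loop2 (baris : Int) (h0 : List Char) (n : Nat) (hn : (n : Int) ≤ baris - 1) :
    (PySem.List.pyRange 0 (n : Int) 1).foldl (bintangStep2 (baris - 1))
        (3, (baris - 1) - 1, h0)
      = ((3 : Int) + 2 * (n : Int), (baris - 1) - 1 - (n : Int),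
         h0 ++ ((PySem.List.pyRange 0 (n : Int) 1).map
             (fun i => bintangAltLine2 baris i ++
               (if i ≠ (baris - 1) - 1 then ['\n'] else []))).flatten) := by
  induction n with
  | zero => simp [PySem.List.pyRange_one_eq_nil (by omega : (0:Int) ≤ 0)]
  | succ n ih =>
    have hc : ((n + 1 : Nat) : Int) = (n : Int) + 1 := by push_cast; ring
    rw [hc, PySem.List.pyRange_one_succ_right (by omega), List.foldl_concat,
      ih (by omega)]
    rw [List.map_append, List.flatten_append]
    show bintangStep2 (baris - 1) _ _ = _
    unfold bintangStep2
    dsimp only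
    rw [pv_spaces_fold]
    rw [PySem.List.foldl_append_singleton_eq_map
      (f := fun j => if j = 0 ∨ j = 3 + 2 * (n : Int) - 1 then '*'
        else if (n : Int) = (baris - 1) - 1 then '*'
        else '.')]
    rw [pv_rowL (baris - 1) (n : Int) (by omega) (by omega)]
    unfold bintangAltLine2
    simp only [Prod.mk.injEq]
    refine ⟨by omega, by first | trivial | omega, ?_⟩
    have e2 : baris - 1 - 1 = baris - 2 := by ring
    rw [e2]
    by_cases hlast : (n : Int) = baris - 2
    · simp [hlast]
    · simp [hlast]

theorem pv_join_flatten (U L : List (List Char)) (hL : L ≠ []) :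
    (U.map (· ++ ['\n'])).flatten ++ PySem.Chars.join ['\n'] L
      = PySem.Chars.join ['\n'] (U ++ L) := by
  induction U with
  | nil => simp
  | cons u U ih =>
    cases hUL : U ++ L with
    | nil => exact absurd (List.append_eq_nil_iff.mp hUL).2 hL
    | cons v R =>
      simp only [List.map_cons, List.flatten_cons, List.cons_append, hUL,
        PySem.Chars.join_cons_cons]
      rw [← hUL, ← ih]
      simp

theorem pv_lower_join (g : Int → List Char) (M : Int) (hM : 1 ≤ M) :
    ((PySem.List.pyRange 0 M 1).map (fun i => g i ++ if i ≠ M - 1 then ['\n'] else [])).flatten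
      = PySem.Chars.join ['\n'] ((PySem.List.pyRange 0 M 1).map g) := by
  have hsing := PySem.List.pyRange_one_singleton (M - 1)
  rw [show M - 1 + 1 = M by ring] at hsing
  have hsplit : PySem.List.pyRange 0 M 1
      = PySem.List.pyRange 0 (M - 1) 1 ++ [M - 1] := by
    rw [PySem.List.pyRange_one_append 0 (M - 1) M (by omega) (by omega), hsing]
  rw [hsplit]
  have hmap : (PySem.List.pyRange 0 (M - 1) 1).map
      (fun i => g i ++ if i ≠ M - 1 then ['\n'] else [])
      = ((PySem.List.pyRange 0 (M - 1) 1).map g).map (· ++ ['\n']) := by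
    rw [List.map_map]
    apply List.map_congr_left
    intro j hj
    rw [PySem.List.mem_pyRange_one] at hj
    have : j ≠ M - 1 := by omega
    simp [this]
  rw [List.map_append, List.flatten_append, hmap]
  rw [List.map_append]
  have hjf := pv_join_flatten ((PySem.List.pyRange 0 (M - 1) 1).map g) [g (M - 1)]
    (by simp)
  rw [PySem.Chars.join_singleton] at hjf
  simp only [List.map_cons, List.map_nil, List.flatten_cons, List.flatten_nil,
    List.append_nil]
  simpa using hjf

-- ===== VERDICT (by name: the statement is the Claim_ definition above) =====
theorem bintang_spec : Claim_equal_bintang := by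
  intro baris _
  unfold Spec_bintang bintang bintang_alt
  by_cases hpos : 1 ≤ baris
  case neg =>
    -- baris ≤ 0: both loops are empty and both results are ""
    have e1 : PySem.List.pyRange 0 baris 1 = [] :=
      PySem.List.pyRange_one_eq_nil (by omega)
    have e2 : PySem.List.pyRange 0 (baris - 1) 1 = [] :=
      PySem.List.pyRange_one_eq_nil (by omega)
    simp [e1, e2]
  case pos =>
    obtain ⟨n, hb⟩ : ∃ n : Nat, baris = (n : Int) := ⟨baris.toNat, by omega⟩
    subst hb
    have hn1 : 1 ≤ n := by omega
    have hcm : (((n - 1 : Nat)) : Int) = (n : Int) - 1 := by omega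
    have h1 := pv_loop1 (n : Int) n le_rfl
    have h2 := pv_loop2 (n : Int)
      (((PySem.List.pyRange 0 (n : Int) 1).map
          (fun i => bintangAltLine1 (n : Int) i ++ pvNlU (n : Int))).flatten)
      (n - 1) (by omega)
    rw [hcm] at h2
    dsimp only
    rw [h1]
    dsimp only
    rw [h2]
    dsimp only
    by_cases hone : (n : Int) = 1
    · -- baris = 1: single row "*", no lower rows
      rw [show ((n : Int)) = 1 from hone]
      have h01 := PySem.List.pyRange_one_singleton 0
      rw [show (0 : Int) + 1 = 1 by ring] at h01
      rw [PySem.List.pyRange_one_eq_nil (by omega : (1 : Int) - 1 ≤ 0), h01]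
      simp [pvNlU, PySem.Chars.join_singleton]
    · -- baris ≥ 2: upper rows all end in '\n', lower rows are '\n'-separated
      have hnl : pvNlU (n : Int) = ['\n'] := by
        unfold pvNlU
        rw [if_neg hone]
      rw [hnl, pv_lower_join (bintangAltLine2 (n : Int)) ((n : Int) - 1) (by omega)]
      have hU : (PySem.List.pyRange 0 (n : Int) 1).map
          (fun i => bintangAltLine1 (n : Int) i ++ ['\n'])
          = ((PySem.List.pyRange 0 (n : Int) 1).map (bintangAltLine1 (n : Int))).map
              (· ++ ['\n']) := by
        rw [List.map_map]
        rfl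
      rw [hU, pv_join_flatten _ _ (by
        have := PySem.List.length_pyRange_one 0 ((n : Int) - 1)
        intro hc
        rw [List.map_eq_nil_iff] at hc
        rw [hc] at this
        simp at this
        omega)]
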